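-- pv_equiv track=rewrite | github.com/victordsantoss/Elementary-Island-by-CheckiO- | IndexPower.py | index_power
-- ===== SOURCE A (Python) =====
-- def index_power (matriz : list, n : int):
--     i = 0
--
--     while i < len (matriz):
--         if i == n:
--             resultado = matriz[n] ** n
--             return resultado
--         i += 1
--     return -1
-- ===== SOURCE B (Python) =====
-- def index_power(matriz: list, n: int):
--     if 0 <= n < len(matriz):
--         return matriz[n] ** n
--     return -1
-- ===== Notes on version B (the rewrite author's own statement) =====
-- stated objective: simpler
-- what changed: Replaces the sequential counter loop (advance i until i == n) with a direct range test 0 <= n < len(matriz) and indexed access; runtime is dominated by the exponentiation, so no measured speedup.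
import Mathlib
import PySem

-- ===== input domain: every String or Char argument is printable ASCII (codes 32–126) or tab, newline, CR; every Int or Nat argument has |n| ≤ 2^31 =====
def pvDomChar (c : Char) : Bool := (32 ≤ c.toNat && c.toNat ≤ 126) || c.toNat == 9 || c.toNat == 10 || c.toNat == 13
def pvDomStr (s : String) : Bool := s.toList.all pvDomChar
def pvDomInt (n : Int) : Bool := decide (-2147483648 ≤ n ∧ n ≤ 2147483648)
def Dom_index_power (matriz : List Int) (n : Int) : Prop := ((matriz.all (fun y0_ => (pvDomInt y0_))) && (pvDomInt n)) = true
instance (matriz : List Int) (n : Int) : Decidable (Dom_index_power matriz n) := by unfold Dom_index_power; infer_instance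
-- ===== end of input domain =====

-- B replaces A's sequential counter scan with a direct bounds check and O(1) index access (simpler).


-- ===== PORT A =====
-- while loop: i counts up from 0; when i == n, return matriz[n] ** n (n = i ≥ 0 there,
-- so pyGet? succeeds and the exponent is n.toNat); after the loop, return -1.
def index_power_go (matriz : List Int) (n : Int) (i : Nat) : Int :=
  if i < matriz.length then
    if (i : Int) = n then ((PySem.List.pyGet? matriz n).getD 0) ^ n.toNat
    else index_power_go matriz n (i + 1)
  else -1
termination_by matriz.length - i

def index_power (matriz : List Int) (n : Int) : Int :=
  index_power_go matriz n 0

-- ===== PORT B =====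
def index_power_alt (matriz : List Int) (n : Int) : Int :=
  if 0 ≤ n ∧ n < (matriz.length : Int) then ((PySem.List.pyGet? matriz n).getD 0) ^ n.toNat
  else -1

-- ===== PRECONDITION & SPEC =====
def Spec_index_power (matriz : List Int) (n : Int) (out : Int) : Prop := out = index_power_alt matriz n
instance (matriz : List Int) (n : Int) (out : Int) : Decidable (Spec_index_power matriz n out) := by unfold Spec_index_power; infer_instance

-- ===== CLAIM (what is proved, stated in full; the proofs are below) =====
def Claim_equal_index_power : Prop := ∀ (matriz : List Int) (n : Int), Dom_index_power matriz n → Spec_index_power matriz n (index_power matriz n)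

-- ===== LEMMAS AND PROOFS =====
-- Loop characterisation: starting the scan at i, A returns the power iff i ≤ n < len.
theorem index_power_go_eq (matriz : List Int) (n : Int) (i : Nat) :
    index_power_go matriz n i =
      if (i : Int) ≤ n ∧ n < (matriz.length : Int) then ((PySem.List.pyGet? matriz n).getD 0) ^ n.toNat
      else -1 := by
  suffices H : ∀ k i, matriz.length - i ≤ k →
      index_power_go matriz n i =
        if (i : Int) ≤ n ∧ n < (matriz.length : Int) then ((PySem.List.pyGet? matriz n).getD 0) ^ n.toNat
        else -1 from H (matriz.length - i) i le_rfl
  intro k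
  induction k with
  | zero =>
    intro i hk
    rw [index_power_go]
    rw [if_neg (by omega : ¬ i < matriz.length)]
    rw [if_neg (show ¬ ((i : Int) ≤ n ∧ n < (matriz.length : Int)) by omega)]
  | succ k ih =>
    intro i hk
    rw [index_power_go]
    by_cases h1 : i < matriz.length
    · rw [if_pos h1]
      by_cases h2 : (i : Int) = n
      · rw [if_pos h2, if_pos ⟨le_of_eq h2, by rw [← h2]; exact_mod_cast h1⟩]
      · rw [if_neg h2, ih (i + 1) (by omega)]
        have hiff : (((i : Nat) + 1 : Int) ≤ n ∧ n < (matriz.length : Int)) ↔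
            ((i : Int) ≤ n ∧ n < (matriz.length : Int)) := by
          constructor <;> exact fun ⟨a, b⟩ => ⟨by omega, b⟩
        push_cast
        push_cast at hiff
        rw [if_congr hiff rfl rfl]
    · rw [if_neg h1,
        if_neg (show ¬ ((i : Int) ≤ n ∧ n < (matriz.length : Int)) by omega)]

-- ===== VERDICT (by name: the statement is the Claim_ definition above) =====
theorem index_power_spec : Claim_equal_index_power := by
  intro matriz n _
  unfold Spec_index_power index_power index_power_alt
  rw [index_power_go_eq]
  norm_num
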